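-- pv_equiv track=rewrite | github.com/zanyaowo/Intelligence-hive | services/analytics_worker/enricher.py | identify_attack_phases
-- ===== SOURCE A (Python) =====
-- from typing import Dict, Any, List, Optional
--
-- def identify_attack_phases(session: Dict[str, Any]) -> List[str]:
--     """
--     識別攻擊階段（基於 Cyber Kill Chain）
--
--     階段：
--     1. Reconnaissance (偵察)
--     2. Scanning (掃描)
--     3. Exploitation (利用)
--     4. Persistence (持久化)
--     5. Exfiltration (滲透)
--     """
--     phases = []
--
--     attack_types = session.get('attack_types', [])
--     paths = session.get('paths', [])
--
--     # Reconnaissance - 只有 index 訪問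
--     if attack_types == ['index'] or all(at == 'index' for at in attack_types):
--         phases.append('reconnaissance')
--
--     # Scanning - 多路徑探測
--     if len(paths) > 5:
--         phases.append('scanning')
--
--     # Exploitation - 有攻擊嘗試
--     exploit_attacks = {'sqli', 'xss', 'lfi', 'rfi', 'cmd_exec', 'xxe_injection'}
--     if any(at in exploit_attacks for at in attack_types):
--         phases.append('exploitation')
--
--     # 如果有 RCE 嘗試，可能進入 Persistence 階段
--     if any(at in {'cmd_exec', 'rfi', 'php_code_injection'} for at in attack_types):
--         phases.append('persistence_attempt')
--
--     return phases if phases else ['unknown']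
-- ===== SOURCE B (Python) =====
-- _CONTRIB = {
--     'index': frozenset(),
--     'sqli': frozenset({'exploitation'}),
--     'xss': frozenset({'exploitation'}),
--     'lfi': frozenset({'exploitation'}),
--     'xxe_injection': frozenset({'exploitation'}),
--     'rfi': frozenset({'exploitation', 'persistence_attempt'}),
--     'cmd_exec': frozenset({'exploitation', 'persistence_attempt'}),
--     'php_code_injection': frozenset({'persistence_attempt'}),
-- }
--
-- _ORDER = ('reconnaissance', 'scanning', 'exploitation', 'persistence_attempt')
--
-- def identify_attack_phases(session):
--     attack_types = session.get('attack_types', [])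
--     paths = session.get('paths', [])
--     tags = set()
--     for at in attack_types:
--         tags |= _CONTRIB.get(at, frozenset())
--         if at != 'index':
--             tags.add('non_index')
--     if 'non_index' not in tags:
--         tags.add('reconnaissance')
--     if len(paths) > 5:
--         tags.add('scanning')
--     phases = [p for p in _ORDER if p in tags]
--     return phases or ['unknown']
-- ===== Notes on version B (the rewrite author's own statement) =====
-- stated objective: alternative
-- what changed: Replaces A's four hard-coded per-phase scans (an equality-plus-all() check and two any() generator passes over literal sets) with a data-driven design: a contribution table mapping each attack type to the phase tags it implies, one union pass collecting tags into a set, and the result produced by filtering a canonical phase-order tuple by set membership.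
import Mathlib
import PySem

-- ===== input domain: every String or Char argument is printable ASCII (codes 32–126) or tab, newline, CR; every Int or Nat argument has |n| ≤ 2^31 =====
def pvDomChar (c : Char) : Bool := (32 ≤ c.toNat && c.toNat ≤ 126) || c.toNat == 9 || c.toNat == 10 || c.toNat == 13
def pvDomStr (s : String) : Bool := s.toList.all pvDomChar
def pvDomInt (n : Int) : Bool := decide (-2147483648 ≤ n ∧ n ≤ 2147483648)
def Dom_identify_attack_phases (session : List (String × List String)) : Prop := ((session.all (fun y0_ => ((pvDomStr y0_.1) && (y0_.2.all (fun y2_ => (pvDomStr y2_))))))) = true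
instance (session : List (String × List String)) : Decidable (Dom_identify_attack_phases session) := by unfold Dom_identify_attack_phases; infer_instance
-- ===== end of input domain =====

-- B replaces A's four per-phase condition checks over attack_types with a data-driven design:
-- a contribution table mapping each attack type to the phase tags it implies, one pass taking
-- the union of the contributions into a tag set, and the output produced by filtering a
-- canonical phase order by set membership (alternative decomposition, same O(n) cost).

-- ===== PORT A =====
-- session.get(k, []) on the association list: first match, default []
def pvSessionGet (session : List (String × List String)) (k : String) : List String :=
  match session.find? (fun p => p.1 == k) with
  | some p => p.2
  | none => []

def identify_attack_phases (session : List (String × List String)) : List String :=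
  let attack_types := pvSessionGet session "attack_types"
  let paths := pvSessionGet session "paths"
  let phases : List String := []
  let phases := if attack_types == ["index"] || attack_types.all (fun at_ => at_ == "index")
                then phases ++ ["reconnaissance"] else phases
  let phases := if paths.length > 5 then phases ++ ["scanning"] else phases
  let exploit_attacks : PySem.Set String :=
    PySem.Set.ofList ["sqli", "xss", "lfi", "rfi", "cmd_exec", "xxe_injection"]
  let phases := if attack_types.any (fun at_ => PySem.Set.contains exploit_attacks at_)
                then phases ++ ["exploitation"] else phases
  let phases := if attack_types.any (fun at_ =>
                  PySem.Set.contains (PySem.Set.ofList ["cmd_exec", "rfi", "php_code_injection"]) at_)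
                then phases ++ ["persistence_attempt"] else phases
  if phases == [] then ["unknown"] else phases

-- ===== PORT B =====
-- Source B's module-level _CONTRIB table (each frozenset rendered as its element list; only
-- membership in these sets is ever used, so the set's internal order is irrelevant)
def pvContrib : PySem.Dict String (List String) :=
  PySem.Dict.mk
  [("index", []), ("sqli", ["exploitation"]), ("xss", ["exploitation"]), ("lfi", ["exploitation"]),
   ("xxe_injection", ["exploitation"]), ("rfi", ["exploitation", "persistence_attempt"]),
   ("cmd_exec", ["exploitation", "persistence_attempt"]), ("php_code_injection", ["persistence_attempt"])]

-- Source B's module-level _ORDER tuple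
def pvOrder : List String := ["reconnaissance", "scanning", "exploitation", "persistence_attempt"]

-- Source B's contribution-union loop over attack_types
def pvTags (attack_types : List String) : PySem.Set String :=
  attack_types.foldl
    (fun tags at_ =>
      let tags := PySem.Set.update tags (PySem.Dict.getD pvContrib at_ [])
      if at_ != "index" then PySem.Set.add tags "non_index" else tags)
    PySem.Set.empty

def identify_attack_phases_alt (session : List (String × List String)) : List String :=
  let attack_types := pvSessionGet session "attack_types"
  let paths := pvSessionGet session "paths"
  let tags := pvTags attack_types
  let tags := if !(PySem.Set.contains tags "non_index") then PySem.Set.add tags "reconnaissance" else tags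
  let tags := if paths.length > 5 then PySem.Set.add tags "scanning" else tags
  let phases := pvOrder.filter (fun p => PySem.Set.contains tags p)
  if phases = [] then ["unknown"] else phases

-- ===== PRECONDITION & SPEC =====
def Spec_identify_attack_phases (session : List (String × List String)) (out : List String) : Prop := out = identify_attack_phases_alt session
instance (session : List (String × List String)) (out : List String) : Decidable (Spec_identify_attack_phases session out) := by unfold Spec_identify_attack_phases; infer_instance

-- ===== CLAIM (what is proved, stated in full; the proofs are below) =====
def Claim_equal_identify_attack_phases : Prop := ∀ (session : List (String × List String)), Dom_identify_attack_phases session → Spec_identify_attack_phases session (identify_attack_phases session)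

-- ===== LEMMAS AND PROOFS =====

theorem mem_tags_fold (l : List String) (s : PySem.Set String) (x : String) :
    (x ∈ l.foldl
      (fun tags at_ =>
        let tags := PySem.Set.update tags (PySem.Dict.getD pvContrib at_ [])
        if at_ != "index" then PySem.Set.add tags "non_index" else tags) s)
    ↔ x ∈ s ∨ ∃ a ∈ l, x ∈ PySem.Dict.getD pvContrib a [] ∨ (a ≠ "index" ∧ x = "non_index") := by
  induction l generalizing s with
  | nil => simp
  | cons a rest ih =>
    rw [List.foldl_cons, ih]
    show (x ∈ (if (a != "index") = true
        then PySem.Set.add (PySem.Set.update s (PySem.Dict.getD pvContrib a [])) "non_index"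
        else PySem.Set.update s (PySem.Dict.getD pvContrib a [])) ∨ _) ↔ _
    by_cases ha : a = "index"
    · simp [ha, PySem.Set.mem_update]
      simp only [or_assoc]
    · simp [ha, PySem.Set.mem_add, PySem.Set.mem_update]
      simp only [or_assoc]

set_option maxRecDepth 8192 in
theorem contrib_exploit (at_ : String) :
    (("exploitation" : String) ∈ PySem.Dict.getD pvContrib at_ []) ↔
    at_ ∈ (["sqli", "xss", "lfi", "rfi", "cmd_exec", "xxe_injection"] : List String) := by
  simp only [pvContrib, PySem.Dict.getD_eq_get?_getD, PySem.Dict.get?_mk_cons]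
  split_ifs <;> simp only [beq_iff_eq] at * <;> try subst_vars
  all_goals first
    | decide
    | (simp only [PySem.Dict.get?, List.find?, Option.map_none, Option.getD_none,
        List.not_mem_nil, false_iff, List.mem_cons]
       rintro (rfl | rfl | rfl | rfl | rfl | rfl | h) <;> simp_all)

set_option maxRecDepth 8192 in
theorem contrib_persist (at_ : String) :
    (("persistence_attempt" : String) ∈ PySem.Dict.getD pvContrib at_ []) ↔
    at_ ∈ (["cmd_exec", "rfi", "php_code_injection"] : List String) := by
  simp only [pvContrib, PySem.Dict.getD_eq_get?_getD, PySem.Dict.get?_mk_cons]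
  split_ifs <;> simp only [beq_iff_eq] at * <;> try subst_vars
  all_goals first
    | decide
    | (simp only [PySem.Dict.get?, List.find?, Option.map_none, Option.getD_none,
        List.not_mem_nil, false_iff, List.mem_cons]
       rintro (rfl | rfl | rfl | h) <;> simp_all)

set_option maxRecDepth 8192 in
theorem contrib_sub (x at_ : String) (h : x ∈ PySem.Dict.getD pvContrib at_ []) :
    x = "exploitation" ∨ x = "persistence_attempt" := by
  simp only [pvContrib, PySem.Dict.getD_eq_get?_getD, PySem.Dict.get?_mk_cons] at h
  split_ifs at h <;> simp_all [PySem.Dict.get?, List.find?]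

theorem tags_exploit (l : List String) :
    (("exploitation" : String) ∈ pvTags l) ↔
    ∃ a ∈ l, a ∈ (["sqli", "xss", "lfi", "rfi", "cmd_exec", "xxe_injection"] : List String) := by
  rw [pvTags, mem_tags_fold]
  simp only [PySem.Set.empty, List.not_mem_nil, false_or]
  constructor
  · rintro ⟨a, hal, hc | ⟨_, hx⟩⟩
    · exact ⟨a, hal, (contrib_exploit a).1 hc⟩
    · exact absurd hx (by decide)
  · rintro ⟨a, hal, hm⟩; exact ⟨a, hal, Or.inl ((contrib_exploit a).2 hm)⟩

theorem tags_persist (l : List String) :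
    (("persistence_attempt" : String) ∈ pvTags l) ↔
    ∃ a ∈ l, a ∈ (["cmd_exec", "rfi", "php_code_injection"] : List String) := by
  rw [pvTags, mem_tags_fold]
  simp only [PySem.Set.empty, List.not_mem_nil, false_or]
  constructor
  · rintro ⟨a, hal, hc | ⟨_, hx⟩⟩
    · exact ⟨a, hal, (contrib_persist a).1 hc⟩
    · exact absurd hx (by decide)
  · rintro ⟨a, hal, hm⟩; exact ⟨a, hal, Or.inl ((contrib_persist a).2 hm)⟩

theorem tags_non (l : List String) :
    (("non_index" : String) ∈ pvTags l) ↔ ∃ a ∈ l, a ≠ "index" := by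
  rw [pvTags, mem_tags_fold]
  simp only [PySem.Set.empty, List.not_mem_nil, false_or]
  constructor
  · rintro ⟨a, hal, hc | ⟨hne, _⟩⟩
    · exact absurd (contrib_sub _ _ hc) (by decide)
    · exact ⟨a, hal, hne⟩
  · rintro ⟨a, hal, hne⟩; exact ⟨a, hal, Or.inr ⟨hne, trivial⟩⟩

theorem tags_rec (l : List String) : (("reconnaissance" : String) ∉ pvTags l) := by
  rw [pvTags, mem_tags_fold]
  rintro (h | ⟨a, _, hc | ⟨_, hx⟩⟩)
  · simp [PySem.Set.empty] at h
  · exact absurd (contrib_sub _ _ hc) (by decide)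
  · exact absurd hx (by decide)

theorem tags_scan (l : List String) : (("scanning" : String) ∉ pvTags l) := by
  rw [pvTags, mem_tags_fold]
  rintro (h | ⟨a, _, hc | ⟨_, hx⟩⟩)
  · simp [PySem.Set.empty] at h
  · exact absurd (contrib_sub _ _ hc) (by decide)
  · exact absurd hx (by decide)

theorem recon_cond (l : List String) :
    ((l == ["index"]) || l.all (fun at_ => at_ == "index")) = true ↔ ¬ ∃ a ∈ l, a ≠ "index" := by
  simp only [Bool.or_eq_true, beq_iff_eq, List.all_eq_true, beq_iff_eq]
  push Not
  constructor
  · rintro (rfl | h)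
    · intro a ha; simpa using ha
    · exact h
  · intro h; exact Or.inr h

theorem any_set_cond (l : List String) (xs : List String) :
    (l.any (fun at_ => PySem.Set.contains (PySem.Set.ofList xs) at_)) = true ↔ ∃ a ∈ l, a ∈ xs := by
  simp [List.any_eq_true, PySem.Set.mem_ofList]

theorem contains_eq_decide (T : PySem.Set String) (x : String) :
    PySem.Set.contains T x = decide (x ∈ T) := by
  rcases Bool.eq_false_or_eq_true (PySem.Set.contains T x) with h | h <;> rw [h] <;> symm
  · simp [(PySem.Set.contains_iff T x).1 h]
  · simp only [decide_eq_false_iff_not]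
    intro hm
    rw [(PySem.Set.contains_iff T x).2 hm] at h
    simp at h

theorem bodies_eq (l paths : List String) :
    (let phases : List String := []
     let phases := if l == ["index"] || l.all (fun at_ => at_ == "index")
                   then phases ++ ["reconnaissance"] else phases
     let phases := if paths.length > 5 then phases ++ ["scanning"] else phases
     let phases := if l.any (fun at_ => PySem.Set.contains
                     (PySem.Set.ofList ["sqli", "xss", "lfi", "rfi", "cmd_exec", "xxe_injection"]) at_)
                   then phases ++ ["exploitation"] else phases
     let phases := if l.any (fun at_ => PySem.Set.contains
                     (PySem.Set.ofList ["cmd_exec", "rfi", "php_code_injection"]) at_)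
                   then phases ++ ["persistence_attempt"] else phases
     if phases == [] then ["unknown"] else phases)
    =
    (let tags := pvTags l
     let tags := if !(PySem.Set.contains tags "non_index") then PySem.Set.add tags "reconnaissance" else tags
     let tags := if paths.length > 5 then PySem.Set.add tags "scanning" else tags
     let phases := pvOrder.filter (fun p => PySem.Set.contains tags p)
     if phases = [] then ["unknown"] else phases) := by
  by_cases hN : ∃ a ∈ l, ¬ a = "index" <;>
  by_cases hE : ∃ a ∈ l, a = "sqli" ∨ a = "xss" ∨ a = "lfi" ∨ a = "rfi" ∨ a = "cmd_exec" ∨ a = "xxe_injection" <;>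
  by_cases hP : ∃ a ∈ l, a = "cmd_exec" ∨ a = "rfi" ∨ a = "php_code_injection" <;>
  by_cases hS : paths.length > 5 <;>
  · have b1 := recon_cond l
    have b2 := any_set_cond l ["sqli", "xss", "lfi", "rfi", "cmd_exec", "xxe_injection"]
    have b3 := any_set_cond l ["cmd_exec", "rfi", "php_code_injection"]
    simp only [contains_eq_decide, pvOrder, List.filter,
      tags_non, tags_exploit, tags_persist]
    simp [hN, hE, hP, hS, b1, b2, b3, tags_rec l, tags_scan l, tags_exploit l,
      tags_persist l, tags_non l, PySem.Set.mem_add]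

-- ===== VERDICT (by name: the statement is the Claim_ definition above) =====
theorem identify_attack_phases_spec : Claim_equal_identify_attack_phases := by
  intro session _
  unfold Spec_identify_attack_phases identify_attack_phases identify_attack_phases_alt
  exact bodies_eq (pvSessionGet session "attack_types") (pvSessionGet session "paths")
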